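-- pv_equiv track=rewrite | github.com/Oh-JunYoung/This-Is-Coding-Test-with-Python | 4. 구현/1966 프린터 큐.py | solution
-- ===== SOURCE A (Python) =====
-- import heapq
-- from collections import deque
--
-- def solution(n, loc, priority):
--     ## index와 함께 있는 리스트를 만든다.
--     priorityList = []
--     for index, p in enumerate(priority):
--         priorityList.append((-p, index))
--
--     ## 우선 순위 큐를 만든다.
--     priorityQ = priorityList.copy()
--     heapq.heapify(priorityQ)
--
--     ## 큐를 만든다.
--     q = deque(priorityList.copy())
--
--     ## 프린트 되는 순서와 저장할 리스트를 만든다.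
--     turn = 1
--     answer = [0 for _ in range(n)]
--
--     ## 모든 프린트의 순서를 구한다.
--     while(len(priorityQ)):
--         ## 가장 높은 우선순위를 찾고
--         p, index = heapq.heappop(priorityQ)
--
--         while(True):
--             ## 가장 높은 우선순위를 가진 프린트를 찾는다.
--             nextP, nextIndex = q.popleft()
--
--             ## 프린트를 찾으면 프린트하고
--             if(p == nextP):
--                 answer[nextIndex] = turn
--                 break
--
--             ## 프린트가 아니면 맨 뒤로 옮긴다.
--             q.append((nextP, nextIndex))
--
--         ## 순서를 증가한다.
--         turn += 1
--
--     ## loc의 프린트의 순서를 출력한다.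
--     return answer[loc]
-- ===== SOURCE B (Python) =====
-- from collections import deque
--
-- def solution(n, loc, priority):
--     q = deque(enumerate(priority))
--     answer = [0] * n
--     turn = 1
--     while q:
--         index, p = q.popleft()
--         if all(p >= other for _, other in q):
--             answer[index] = turn
--             turn += 1
--         else:
--             q.append((index, p))
--     return answer[loc]
-- ===== Notes on version B (the rewrite author's own statement) =====
-- stated objective: simpler
-- what changed: Drops the heap entirely: instead of popping priorities from a heapified copy and rotating a deque to the matching priority, B keeps a single deque of (index,priority) and prints the front exactly when its priority is maximal among the current deque contents.
import Mathlib
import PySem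

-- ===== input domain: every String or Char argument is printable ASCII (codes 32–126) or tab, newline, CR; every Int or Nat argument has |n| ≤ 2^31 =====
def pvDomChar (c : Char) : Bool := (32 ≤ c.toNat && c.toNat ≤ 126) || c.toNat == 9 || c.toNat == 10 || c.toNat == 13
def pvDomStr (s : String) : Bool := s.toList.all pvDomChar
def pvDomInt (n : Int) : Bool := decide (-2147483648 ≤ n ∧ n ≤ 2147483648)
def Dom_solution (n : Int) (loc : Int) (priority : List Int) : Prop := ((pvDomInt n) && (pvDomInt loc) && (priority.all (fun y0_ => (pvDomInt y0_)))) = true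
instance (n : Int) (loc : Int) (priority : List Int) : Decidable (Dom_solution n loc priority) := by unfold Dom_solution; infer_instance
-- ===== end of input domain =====

-- B replaces A's heap + rotate-to-priority simulation by a single deque whose front is
-- printed iff its priority is maximal among the current deque contents (simpler, no heap).


-- ===== PORT A =====
-- inner while(True): popleft until the front's priority equals p, recording its index and
-- leaving the rotated deque; `moved` holds the elements appended to the back so far.
-- none = Python's IndexError on popleft of an empty deque (unreachable on Pre_ inputs).
def innerA : Int → List (Int × Int) → List (Int × Int) → Option (Int × List (Int × Int))
  | _, [], _ => none
  | p, (nP, nI) :: rest, moved =>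
      if p = nP then some (nI, rest ++ moved)
      else innerA p rest (moved ++ [(nP, nI)])

-- outer while(len(priorityQ)): pop the heap minimum (the heap is consumed in ascending
-- order, materialised below as a sorted list), run the inner loop, bump turn.
def loopA : List (Int × Int) → List (Int × Int) → Int → List Int → List Int
  | [], _, _, answer => answer
  | (p, _) :: hs, q, turn, answer =>
      match innerA p q [] with
      | none => answer                                   -- Python raises here; unreachable under Pre_
      | some (nI, q') => loopA hs q' (turn + 1) (answer.set nI.toNat turn)

def solution (n : Int) (loc : Int) (priority : List Int) : Int :=
  let priorityList := (PySem.List.enumerate priority 0).map (fun ip => (-ip.2, ip.1))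
  -- heapify + heappop until empty consumes the distinct pairs (-p, index) in ascending
  -- lexicographic order; priorityList is in increasing index order, so the STABLE sort by
  -- the first component is exactly that order.
  let priorityQ := PySem.List.sorted priorityList (fun x => x.1) false
  let answer := (PySem.List.pyRange 0 n 1).map (fun _ => (0 : Int))
  let final := loopA priorityQ priorityList 1 answer
  (PySem.List.pyGet? final loc).getD 0                   -- answer[loc]; out of range = IndexError, excluded by Pre_

-- ===== PORT B =====
-- one pass of B's while loop up to (and including) the first successful print:
-- popleft the front; if its priority is ≥ every priority still in the deque,print it
-- (return its index and the deque as left by the rotation), else append it to the back.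
def scanB : List (Int × Int) → List (Int × Int) → Option (Int × List (Int × Int))
  | [], _ => none
  | (i, p) :: rest, moved =>
      if (rest ++ moved).all (fun x => x.2 ≤ p) then some (i, rest ++ moved)
      else scanB rest (moved ++ [(i, p)])

theorem scanB_length : ∀ (q moved : List (Int × Int)) (i : Int) (q' : List (Int × Int)),
    scanB q moved = some (i, q') → q'.length + 1 = q.length + moved.length := by
  intro q
  induction q with
  | nil => intro moved i q' h; simp [scanB] at h
  | cons x rest ih =>
    intro moved i q' h
    obtain ⟨xi, xp⟩ := x
    simp only [scanB] at h
    split at h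
    · cases h; simp; omega
    · have := ih (moved ++ [(xi, xp)]) i q' h
      simp [List.length_append] at this ⊢; omega

def loopB (q : List (Int × Int)) (turn : Int) (answer : List Int) : List Int :=
  match h : scanB q [] with
  | none => answer
  | some (i, q') => loopB q' (turn + 1) (answer.set i.toNat turn)
termination_by q.length
decreasing_by
  have := scanB_length q [] i q' h
  simp at this; omega

def solution_alt (n : Int) (loc : Int) (priority : List Int) : Int :=
  let q := PySem.List.enumerate priority 0
  let answer := (PySem.List.pyRange 0 n 1).map (fun _ => (0 : Int))
  (PySem.List.pyGet? (loopB q 1 answer) loc).getD 0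

-- ===== PRECONDITION & SPEC =====
-- Pre_ excludes exactly the inputs on which A raises IndexError: a `loc` outside the
-- (possibly negative) index range of answer = [0]*n, or n < len(priority), in which case
-- some answer[index] = turn assignment is out of range.
def Pre_solution (n : Int) (loc : Int) (priority : List Int) : Prop :=
  (priority.length : Int) ≤ n ∧ -n ≤ loc ∧ loc < n
instance (n : Int) (loc : Int) (priority : List Int) : Decidable (Pre_solution n loc priority) := by
  unfold Pre_solution; infer_instance

def pvWitness_solution : Int × Int × List Int := (4, 2, [1, 3, 2, 3])

def Spec_solution (n : Int) (loc : Int) (priority : List Int) (out : Int) : Prop := out = solution_alt n loc priority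
instance (n : Int) (loc : Int) (priority : List Int) (out : Int) : Decidable (Spec_solution n loc priority out) := by unfold Spec_solution; infer_instance

-- ===== CLAIM (what is proved, stated in full; the proofs are below) =====
def Claim_equal_solution : Prop := ∀ (n : Int) (loc : Int) (priority : List Int), Dom_solution n loc priority → Pre_solution n loc priority → Spec_solution n loc priority (solution n loc priority)

-- ===== LEMMAS AND PROOFS =====

-- the coupling between the two deque representations: A stores (-p, index), B stores (index, p)
def pvSw (x : Int × Int) : Int × Int := (x.2, -x.1)

-- If p is ≤ every first component in sight and occurs as a first component of the unscanned
-- part, then A's inner rotation and B's scan succeed together: same printed index, and the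
-- resulting deques are pvSw-images of each other.
theorem inner_scan_align : ∀ (q moved : List (Int × Int)) (p : Int),
    (∀ x ∈ q ++ moved, p ≤ x.1) → (∃ x ∈ q, x.1 = p) →
    ∃ nI q', innerA p q moved = some (nI, q') ∧
      scanB (q.map pvSw) (moved.map pvSw) = some (nI, q'.map pvSw) := by
  intro q
  induction q with
  | nil => intro moved p _ hex; simp at hex
  | cons hd rest ih =>
    intro moved p hle hex
    obtain ⟨nP, nI⟩ := hd
    by_cases hp : p = nP
    · subst hp
      refine ⟨nI, rest ++ moved, by simp [innerA], ?_⟩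
      have hall : (rest.map pvSw ++ moved.map pvSw).all (fun x => x.2 ≤ -p) = true := by
        rw [List.all_eq_true]
        intro x hx
        rcases List.mem_append.1 hx with hx | hx <;>
          · obtain ⟨y, hy, rfl⟩ := List.mem_map.1 hx
            have := hle y (by simp [hy])
            simp [pvSw]; omega
      simp [scanB, pvSw, hall]
    · have hex' : ∃ x ∈ rest, x.1 = p := by
        obtain ⟨x, hx, hxp⟩ := hex
        rcases List.mem_cons.1 hx with rfl | hx
        · exact absurd hxp.symm hp
        · exact ⟨x, hx, hxp⟩
      have hcond : ¬ ((rest.map pvSw ++ moved.map pvSw).all (fun x => x.2 ≤ -nP) = true) := by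
        obtain ⟨x, hx, hxp⟩ := hex'
        have hpn : p < nP := by
          have := hle (nP, nI) (by simp)
          simp at this; omega
        rw [List.all_eq_true]
        intro hall
        have := hall (pvSw x) (List.mem_append.2 (Or.inl (List.mem_map.2 ⟨x, hx, rfl⟩)))
        simp [pvSw, hxp] at this; omega
      have hle' : ∀ x ∈ rest ++ (moved ++ [(nP, nI)]), p ≤ x.1 := by
        intro x hx
        rcases List.mem_append.1 hx with hx | hx
        · exact hle x (by simp [hx])
        · rcases List.mem_append.1 hx with hx | hx
          · exact hle x (by simp [hx])
          · simp at hx; subst hx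
            have := hle (nP, nI) (by simp); simpa using this
      obtain ⟨nI', q', hA, hB⟩ := ih (moved ++ [(nP, nI)]) p hle' hex'
      refine ⟨nI', q', ?_, ?_⟩
      · simp [innerA, hp, hA]
      · simp only [List.map_cons, scanB, pvSw]
        rw [if_neg (by simpa [pvSw] using hcond)]
        simpa [pvSw] using hB

-- removing the matched element: the printed pair is literally (p, nI)
theorem innerA_perm : ∀ (q moved : List (Int × Int)) (p nI : Int) (q' : List (Int × Int)),
    innerA p q moved = some (nI, q') → ((p, nI) :: q').Perm (q ++ moved) := by
  intro q
  induction q with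
  | nil => intro moved p nI q' h; simp [innerA] at h
  | cons hd rest ih =>
    intro moved p nI q' h
    obtain ⟨nP, nI0⟩ := hd
    simp only [innerA] at h
    split at h
    · rename_i hpe
      cases h
      subst hpe
      exact List.Perm.refl _
    · have hperm := ih (moved ++ [(nP, nI0)]) p nI q' h
      refine hperm.trans ?_
      have heq : rest ++ (moved ++ [(nP, nI0)]) = (rest ++ moved) ++ [(nP, nI0)] := by simp
      rw [heq]
      simpa using List.perm_append_singleton (nP, nI0) (rest ++ moved)

-- main loop alignment: heap list sorted by first component, with the same multiset of
-- first components as the deque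
theorem loop_align : ∀ (hs : List (Int × Int)) (q : List (Int × Int)) (turn : Int) (answer : List Int),
    hs.Pairwise (fun a b => a.1 ≤ b.1) →
    (hs.map Prod.fst).Perm (q.map Prod.fst) →
    loopA hs q turn answer = loopB (q.map pvSw) turn answer := by
  intro hs
  induction hs with
  | nil =>
    intro q turn answer _ hperm
    have hq : q = [] := by
      have h0 : q.map Prod.fst = [] := hperm.symm.eq_nil
      exact List.map_eq_nil_iff.1 h0
    subst hq
    rw [loopB]
    rfl
  | cons hd hs' ih =>
    intro q turn answer hpw hperm
    obtain ⟨np, i0⟩ := hd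
    have hle : ∀ x ∈ q ++ ([] : List (Int × Int)), np ≤ x.1 := by
      intro x hx
      simp at hx
      have hmem : x.1 ∈ (((np, i0) :: hs').map Prod.fst) :=
        hperm.symm.mem_iff.1 (List.mem_map.2 ⟨x, hx, rfl⟩)
      rcases List.mem_cons.1 hmem with h | h
      · simp at h; omega
      · obtain ⟨y, hy, hyx⟩ := List.mem_map.1 h
        have := (List.pairwise_cons.1 hpw).1 y hy
        simp at this; omega
    have hex : ∃ x ∈ q, x.1 = np := by
      have hmem : np ∈ q.map Prod.fst := hperm.mem_iff.1 (by simp)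
      obtain ⟨y, hy, hyx⟩ := List.mem_map.1 hmem
      exact ⟨y, hy, hyx⟩
    obtain ⟨nI, q', hA, hB⟩ := inner_scan_align q [] np hle hex
    have hBstep : loopB (q.map pvSw) turn answer
        = loopB (q'.map pvSw) (turn + 1) (answer.set nI.toNat turn) := by
      rw [loopB]
      simp only [List.map_nil] at hB
      rw [hB]
    rw [hBstep]
    simp only [loopA, hA]
    refine ih q' (turn + 1) (answer.set nI.toNat turn) (List.pairwise_cons.1 hpw).2 ?_
    have hperm' := (innerA_perm q [] np nI q' hA).map Prod.fst
    simp only [List.append_nil, List.map_cons] at hperm'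
    have h1 : (np :: hs'.map Prod.fst).Perm (q.map Prod.fst) := by simpa using hperm
    exact (h1.trans hperm'.symm).cons_inv

-- ===== VERDICT (by name: the statement is the Claim_ definition above) =====
theorem solution_spec : Claim_equal_solution := by
  unfold Claim_equal_solution
  intro n loc priority _ _
  unfold Spec_solution solution solution_alt
  simp only []
  have hmap : ((PySem.List.enumerate priority 0).map (fun ip => (-ip.2, ip.1))).map pvSw
      = PySem.List.enumerate priority 0 := by
    rw [List.map_map]
    have hfun : (pvSw ∘ fun ip : Int × Int => (-ip.2, ip.1)) = id := by
      funext ip; simp [pvSw]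
    rw [hfun, List.map_id]
  conv_rhs => rw [← hmap]
  have hpw : (PySem.List.sorted ((PySem.List.enumerate priority 0).map (fun ip => (-ip.2, ip.1)))
      (fun x => x.1) false).Pairwise (fun a b : Int × Int => a.1 ≤ b.1) := by
    simpa using PySem.List.sorted_pairwise
      ((PySem.List.enumerate priority 0).map (fun ip => (-ip.2, ip.1))) (fun x => x.1)
  have hperm : ((PySem.List.sorted ((PySem.List.enumerate priority 0).map (fun ip => (-ip.2, ip.1)))
        (fun x => x.1) false).map Prod.fst).Perm
      (((PySem.List.enumerate priority 0).map (fun ip => (-ip.2, ip.1))).map Prod.fst) :=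
    (PySem.List.sorted_perm _ _ _).map Prod.fst
  rw [loop_align _ _ 1 _ hpw hperm]
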